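-- pv_equiv track=rewrite | github.com/inaciovasquez2020/chronos-urf-rr | tests/run_local_cycle_tests.py | count_local_cycles
-- ===== SOURCE A (Python) =====
-- def count_local_cycles(adj, ball, limit=8):
--     cycles = set()
--     nodes = list(ball)
--
--     for u in nodes:
--         stack = [(u, [u])]
--
--         while stack:
--             v, path = stack.pop()
--
--             if len(path) > limit:
--                 continue
--
--             for w in adj[v]:
--
--                 if w == u and len(path) >= 3:
--                     cyc = tuple(sorted(path))
--                     cycles.add(cyc)
--
--                 elif w not in path and w in ball:
--                     stack.append((w, path + [w]))
--
--     return cycles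
-- ===== SOURCE B (Python) =====
-- def count_local_cycles(adj, ball, limit=8):
--     # Recursive DFS instead of the explicit stack; children are explored
--     # last-first, matching the LIFO order of the stack version.
--     cycles = set()
--
--     def dfs(u, v, path):
--         if len(path) > limit:
--             return
--         nxt = []
--         for w in adj[v]:
--             if w == u and len(path) >= 3:
--                 cycles.add(tuple(sorted(path)))
--             elif w not in path and w in ball:
--                 nxt.append(w)
--         for w in reversed(nxt):
--             dfs(u, w, path + [w])
--
--     for u in ball:
--         dfs(u, u, [u])
--     return cycles
-- ===== Notes on version B (the rewrite author's own statement) =====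
-- stated objective: idiomatic
-- what changed: Replaces the explicit-stack while-loop DFS with a recursive dfs helper (children explored last-first, preserving the stack's LIFO order); same cycle set.
import Mathlib
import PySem

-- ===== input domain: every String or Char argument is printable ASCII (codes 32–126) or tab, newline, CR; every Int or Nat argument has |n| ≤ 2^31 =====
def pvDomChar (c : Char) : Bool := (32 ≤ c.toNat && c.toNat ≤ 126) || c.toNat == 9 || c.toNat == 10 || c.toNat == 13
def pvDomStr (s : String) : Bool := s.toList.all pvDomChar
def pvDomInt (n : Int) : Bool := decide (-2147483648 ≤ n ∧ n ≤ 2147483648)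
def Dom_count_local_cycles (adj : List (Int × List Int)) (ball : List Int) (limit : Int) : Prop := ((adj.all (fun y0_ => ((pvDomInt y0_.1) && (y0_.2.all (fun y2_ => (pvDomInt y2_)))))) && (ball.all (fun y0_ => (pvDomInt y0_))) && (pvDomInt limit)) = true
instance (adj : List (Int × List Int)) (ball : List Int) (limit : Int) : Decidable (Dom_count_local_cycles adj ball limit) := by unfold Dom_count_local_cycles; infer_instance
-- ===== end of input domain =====

-- B rewrites A's explicit-stack DFS as a recursive DFS helper (same values, children
-- explored last-first matching the stack's LIFO order); objective: idiomatic, not faster.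
-- ===== PORT A =====
-- adj[v] on the dict adj (Pre_ excludes the KeyError case, where .getD [] is never reached)
def pvNbrs (adj : List (Int × List Int)) (v : Int) : List Int :=
  ((PySem.Dict.mk adj).get? v).getD []

-- one step of A's inner 'for w in adj[v]' loop; state = (stack, cycles).
-- Python's stack has its top at the END; we keep the top at the HEAD, so
-- stack.append is cons and stack.pop() is uncons — the same LIFO discipline.
def pvStepA (ball : List Int) (u : Int) (path : List Int)
    (st : List (Int × List Int) × PySem.Set (List Int)) (w : Int) :
    List (Int × List Int) × PySem.Set (List Int) :=
  if w == u && decide (3 ≤ path.length) then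
    (st.1, PySem.Set.add st.2 (PySem.List.sorted path (fun x => x) false))
  else if !path.contains w && ball.contains w then
    ((w, path ++ [w]) :: st.1, st.2)
  else st

-- the children A pushes for node v with path 'path' (in adj order), and the cycles it records
def pvElig (ball : List Int) (u : Int) (path : List Int) (ws : List Int) : List Int :=
  ws.filter (fun w => !(w == u && decide (3 ≤ path.length)) && (!path.contains w && ball.contains w))

def pvCyc (u : Int) (path : List Int) (ws : List Int) (c : PySem.Set (List Int)) :
    PySem.Set (List Int) :=
  ws.foldl (fun c w =>
    if w == u && decide (3 ≤ path.length) then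
      PySem.Set.add c (PySem.List.sorted path (fun x => x) false)
    else c) c

-- characterization of the inner loop (cited by pvLoopA's termination proof)
theorem pvStepA_foldl (ball : List Int) (u : Int) (path : List Int) :
    ∀ (ws : List Int) (s : List (Int × List Int)) (c : PySem.Set (List Int)),
      ws.foldl (pvStepA ball u path) (s, c)
        = ((pvElig ball u path ws).reverse.map (fun w => (w, path ++ [w])) ++ s,
           pvCyc u path ws c) := by
  intro ws
  induction ws with
  | nil => intro s c; simp [pvElig, pvCyc]
  | cons w t ih =>
    intro s c
    by_cases hu : w = u <;> by_cases h3 : 3 ≤ path.length <;>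
      by_cases hp : w ∈ path <;> by_cases hb : w ∈ ball <;>
      (simp_all [pvStepA, pvElig, pvCyc]; try (simp [show ¬(3 : ℕ) ≤ path.length by omega]))

def pvMaxDeg (adj : List (Int × List Int)) : Nat :=
  adj.foldr (fun p m => max p.2.length m) 0

def pvWeight (adj : List (Int × List Int)) (limit : Int) (e : Int × List Int) : Nat :=
  (pvMaxDeg adj + 2) ^ (limit.toNat + 2 - e.2.length)

def pvMeasure (adj : List (Int × List Int)) (limit : Int) (st : List (Int × List Int)) : Nat :=
  (st.map (pvWeight adj limit)).sum

theorem pvNbrs_length_le (adj : List (Int × List Int)) (v : Int) :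
    (pvNbrs adj v).length ≤ pvMaxDeg adj := by
  induction adj with
  | nil => simp [pvNbrs, pvMaxDeg, PySem.Dict.get?]
  | cons p t ih =>
    obtain ⟨k, l⟩ := p
    rw [pvNbrs, PySem.Dict.get?_mk_cons]
    by_cases h : (k == v) = true
    · simp [h, pvMaxDeg]
    · simp only [h, Bool.false_eq_true, if_neg, not_false_iff]
      have h2 : pvMaxDeg ((k, l) :: t) = max l.length (pvMaxDeg t) := rfl
      have := ih
      rw [pvNbrs] at this
      omega

theorem pvPushed_lt (adj : List (Int × List Int)) (limit : Int) (path : List Int)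
    (hlim : ¬ ((path.length : Int) > limit)) (l : List (Int × List Int))
    (hlen : l.length ≤ pvMaxDeg adj)
    (hall : ∀ e ∈ l, e.2.length = path.length + 1) (v : Int) :
    pvMeasure adj limit l < pvWeight adj limit (v, path) := by
  have hC : 0 < pvMaxDeg adj + 2 := by omega
  have hlen2 : path.length ≤ limit.toNat := by omega
  have hsum : ∀ (m : List (Int × List Int)), (∀ e ∈ m, e.2.length = path.length + 1) →
      pvMeasure adj limit m
        = m.length * (pvMaxDeg adj + 2) ^ (limit.toNat + 2 - (path.length + 1)) := by
    intro m
    induction m with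
    | nil => intro _; simp [pvMeasure]
    | cons e t ih =>
      intro h
      have he : e.2.length = path.length + 1 := h e (by simp)
      have ht := ih (fun x hx => h x (by simp [hx]))
      simp only [pvMeasure, List.map_cons, List.sum_cons, List.length_cons] at *
      rw [pvWeight, he, ht]
      ring
  rw [hsum l hall, pvWeight]
  have hKL : limit.toNat + 2 - path.length = (limit.toNat + 2 - (path.length + 1)) + 1 := by
    omega
  rw [hKL, pow_succ]
  have hX : 0 < (pvMaxDeg adj + 2) ^ (limit.toNat + 2 - (path.length + 1)) :=
    pow_pos hC _
  calc l.length * (pvMaxDeg adj + 2) ^ (limit.toNat + 2 - (path.length + 1))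
      ≤ pvMaxDeg adj * (pvMaxDeg adj + 2) ^ (limit.toNat + 2 - (path.length + 1)) :=
        Nat.mul_le_mul_right _ hlen
    _ < (pvMaxDeg adj + 2) ^ (limit.toNat + 2 - (path.length + 1)) * (pvMaxDeg adj + 2) := by
        rw [mul_comm]
        exact (Nat.mul_lt_mul_left hX).mpr (by omega)

-- A's while-loop over the stack (for one start node u)
def pvLoopA (adj : List (Int × List Int)) (ball : List Int) (limit : Int) (u : Int)
    (stack : List (Int × List Int)) (cycles : PySem.Set (List Int)) : PySem.Set (List Int) :=
  match stack with
  | [] => cycles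
  | (v, path) :: rest =>
    if h : (path.length : Int) > limit then
      pvLoopA adj ball limit u rest cycles
    else
      let st := (pvNbrs adj v).foldl (pvStepA ball u path) (rest, cycles)
      pvLoopA adj ball limit u st.1 st.2
termination_by pvMeasure adj limit stack
decreasing_by
  · simp only [pvMeasure, List.map_cons, List.sum_cons]
    have := pow_pos (show 0 < pvMaxDeg adj + 2 by omega) (limit.toNat + 2 - path.length)
    simp only [pvWeight]
    omega
  · rw [pvStepA_foldl]
    simp only [pvMeasure, List.map_cons, List.sum_cons, List.map_append, List.sum_append]
    have hlt := pvPushed_lt adj limit path h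
      ((pvElig ball u path (pvNbrs adj v)).reverse.map (fun w => (w, path ++ [w])))
      (by
        rw [List.length_map, List.length_reverse]
        exact le_trans (List.length_filter_le _ _) (pvNbrs_length_le adj v))
      (by
        intro e he
        simp only [List.mem_map] at he
        obtain ⟨w, _, rfl⟩ := he
        simp)
      v
    simp only [pvMeasure] at hlt
    omega

def count_local_cycles (adj : List (Int × List Int)) (ball : List Int) (limit : Int) :
    List (List Int) :=
  ball.foldl (fun cycles u => pvLoopA adj ball limit u [(u, [u])] cycles) PySem.Set.empty

-- ===== PORT B =====
-- one step of B's 'for w in adj[v]' scan; state = (nxt, cycles), nxt appended at the end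
def pvStepB (ball : List Int) (u : Int) (path : List Int)
    (st : List Int × PySem.Set (List Int)) (w : Int) :
    List Int × PySem.Set (List Int) :=
  if w == u && decide (3 ≤ path.length) then
    (st.1, PySem.Set.add st.2 (PySem.List.sorted path (fun x => x) false))
  else if !path.contains w && ball.contains w then
    (st.1 ++ [w], st.2)
  else st

-- B's recursive dfs(u, v, path); 'for w in reversed(nxt): dfs(...)' is the final foldl
def pvDfsB (adj : List (Int × List Int)) (ball : List Int) (limit : Int)
    (u : Int) (v : Int) (path : List Int) (cycles : PySem.Set (List Int)) :
    PySem.Set (List Int) :=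
  if h : (path.length : Int) > limit then cycles
  else
    let sc := (pvNbrs adj v).foldl (pvStepB ball u path) ([], cycles)
    sc.1.reverse.foldl (fun c w => pvDfsB adj ball limit u w (path ++ [w]) c) sc.2
termination_by (limit + 1 - (path.length : Int)).toNat
decreasing_by
  simp only [List.length_append, List.length_cons, List.length_nil]
  omega

def count_local_cycles_alt (adj : List (Int × List Int)) (ball : List Int) (limit : Int) :
    List (List Int) :=
  ball.foldl (fun cycles u => pvDfsB adj ball limit u u [u] cycles) PySem.Set.empty

-- ===== PRECONDITION & SPEC =====
-- A evaluates adj[x] only when limit ≥ 1 (with limit ≤ 0 every popped path already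
-- exceeds the limit), and then exactly for the start nodes, i.e. for every member of
-- ball: a ball node missing from adj's keys is a KeyError in both Pythons.
def Pre_count_local_cycles (adj : List (Int × List Int)) (ball : List Int) (limit : Int) : Prop :=
  1 ≤ limit → ∀ x ∈ ball, (PySem.Dict.mk adj).contains x = true
instance (adj : List (Int × List Int)) (ball : List Int) (limit : Int) :
    Decidable (Pre_count_local_cycles adj ball limit) := by
  unfold Pre_count_local_cycles; infer_instance

def pvWitness_count_local_cycles : (List (Int × List Int)) × List Int × Int :=
  ([(1, [2, 3]), (2, [3, 1]), (3, [1, 2])], [1, 2, 3], 8)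

def Spec_count_local_cycles (adj : List (Int × List Int)) (ball : List Int) (limit : Int) (out : List (List Int)) : Prop := out = count_local_cycles_alt adj ball limit
instance (adj : List (Int × List Int)) (ball : List Int) (limit : Int) (out : List (List Int)) : Decidable (Spec_count_local_cycles adj ball limit out) := by unfold Spec_count_local_cycles; infer_instance

-- ===== CLAIM (what is proved, stated in full; the proofs are below) =====
def Claim_equal_count_local_cycles : Prop := ∀ (adj : List (Int × List Int)) (ball : List Int) (limit : Int), Dom_count_local_cycles adj ball limit → Pre_count_local_cycles adj ball limit → Spec_count_local_cycles adj ball limit (count_local_cycles adj ball limit)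

-- ===== LEMMAS AND PROOFS =====
theorem pvStepB_foldl (ball : List Int) (u : Int) (path : List Int) :
    ∀ (ws : List Int) (nx : List Int) (c : PySem.Set (List Int)),
      ws.foldl (pvStepB ball u path) (nx, c)
        = (nx ++ pvElig ball u path ws, pvCyc u path ws c) := by
  intro ws
  induction ws with
  | nil => intro nx c; simp [pvElig, pvCyc]
  | cons w t ih =>
    intro nx c
    by_cases hu : w = u <;> by_cases h3 : 3 ≤ path.length <;>
      by_cases hp : w ∈ path <;> by_cases hb : w ∈ ball <;>
      (simp_all [pvStepB, pvElig, pvCyc]; try (simp [show ¬(3 : ℕ) ≤ path.length by omega]))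

theorem pvLoopA_nil (adj : List (Int × List Int)) (ball : List Int) (limit : Int) (u : Int)
    (c : PySem.Set (List Int)) : pvLoopA adj ball limit u [] c = c := by
  rw [pvLoopA]

theorem pvLoopA_cons_gt (adj : List (Int × List Int)) (ball : List Int) (limit : Int) (u : Int)
    (v : Int) (path : List Int) (rest : List (Int × List Int)) (c : PySem.Set (List Int))
    (h : (path.length : Int) > limit) :
    pvLoopA adj ball limit u ((v, path) :: rest) c = pvLoopA adj ball limit u rest c := by
  rw [pvLoopA]; simp [h]

theorem pvLoopA_cons_le (adj : List (Int × List Int)) (ball : List Int) (limit : Int) (u : Int)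
    (v : Int) (path : List Int) (rest : List (Int × List Int)) (c : PySem.Set (List Int))
    (h : ¬ ((path.length : Int) > limit)) :
    pvLoopA adj ball limit u ((v, path) :: rest) c
      = pvLoopA adj ball limit u
          ((pvElig ball u path (pvNbrs adj v)).reverse.map (fun w => (w, path ++ [w])) ++ rest)
          (pvCyc u path (pvNbrs adj v) c) := by
  rw [pvLoopA]; simp [h, pvStepA_foldl]

theorem pvDfsB_gt (adj : List (Int × List Int)) (ball : List Int) (limit : Int) (u : Int)
    (v : Int) (path : List Int) (c : PySem.Set (List Int))
    (h : (path.length : Int) > limit) :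
    pvDfsB adj ball limit u v path c = c := by
  rw [pvDfsB]; simp [h]

theorem pvDfsB_le (adj : List (Int × List Int)) (ball : List Int) (limit : Int) (u : Int)
    (v : Int) (path : List Int) (c : PySem.Set (List Int))
    (h : ¬ ((path.length : Int) > limit)) :
    pvDfsB adj ball limit u v path c
      = (pvElig ball u path (pvNbrs adj v)).reverse.foldl
          (fun c w => pvDfsB adj ball limit u w (path ++ [w]) c)
          (pvCyc u path (pvNbrs adj v) c) := by
  rw [pvDfsB]; simp [h, pvStepB_foldl]

-- stack machine = recursion: processing a segment xs of the stack folds dfs over it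
theorem pvBridge (adj : List (Int × List Int)) (ball : List Int) (limit : Int) (u : Int) :
    ∀ (n : Nat) (xs rest : List (Int × List Int)) (c : PySem.Set (List Int)),
      pvMeasure adj limit xs = n →
      pvLoopA adj ball limit u (xs ++ rest) c
        = pvLoopA adj ball limit u rest
            (xs.foldl (fun c e => pvDfsB adj ball limit u e.1 e.2 c) c) := by
  intro n
  induction n using Nat.strong_induction_on with
  | _ n ih =>
    intro xs rest c hm
    match xs with
    | [] => simp
    | (v, path) :: xs' =>
      have hw1 : 1 ≤ pvWeight adj limit (v, path) :=
        Nat.one_le_iff_ne_zero.mpr (Nat.pos_iff_ne_zero.mp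
          (pow_pos (by omega) _))
      have hmc : pvMeasure adj limit ((v, path) :: xs')
          = pvWeight adj limit (v, path) + pvMeasure adj limit xs' := by
        simp [pvMeasure]
      by_cases h : (path.length : Int) > limit
      · rw [List.cons_append, pvLoopA_cons_gt adj ball limit u v path _ c h]
        rw [ih (pvMeasure adj limit xs') (by omega) xs' rest c rfl]
        simp [pvDfsB_gt adj ball limit u v path c h]
      · rw [List.cons_append, pvLoopA_cons_le adj ball limit u v path _ c h,
          ← List.append_assoc]
        have hpm : pvMeasure adj limit
            ((pvElig ball u path (pvNbrs adj v)).reverse.map (fun w => (w, path ++ [w])) ++ xs')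
            < n := by
          have hlt := pvPushed_lt adj limit path h
            ((pvElig ball u path (pvNbrs adj v)).reverse.map (fun w => (w, path ++ [w])))
            (by
              rw [List.length_map, List.length_reverse]
              exact le_trans (List.length_filter_le _ _) (pvNbrs_length_le adj v))
            (by
              intro e he
              simp only [List.mem_map] at he
              obtain ⟨w, _, rfl⟩ := he
              simp)
            v
          have happ : pvMeasure adj limit
              ((pvElig ball u path (pvNbrs adj v)).reverse.map (fun w => (w, path ++ [w])) ++ xs')
              = pvMeasure adj limit
                  ((pvElig ball u path (pvNbrs adj v)).reverse.map (fun w => (w, path ++ [w])))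
                + pvMeasure adj limit xs' := by
            simp [pvMeasure]
          omega
        rw [ih _ hpm _ rest (pvCyc u path (pvNbrs adj v) c) rfl]
        rw [List.foldl_append, List.foldl_map]
        rw [← pvDfsB_le adj ball limit u v path c h]
        simp

-- ===== VERDICT (by name: the statement is the Claim_ definition above) =====
theorem count_local_cycles_spec : Claim_equal_count_local_cycles := by
  intro adj ball limit _ _
  unfold Spec_count_local_cycles count_local_cycles count_local_cycles_alt
  have hfun : ∀ (c : PySem.Set (List Int)) (u : Int),
      pvLoopA adj ball limit u [(u, [u])] c = pvDfsB adj ball limit u u [u] c := by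
    intro c u
    have h := pvBridge adj ball limit u (pvMeasure adj limit [(u, [u])]) [(u, [u])] [] c rfl
    simpa [pvLoopA_nil] using h
  simp only [hfun]
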